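-- pv_equiv track=rewrite | github.com/ThenTech/BDA-Assignments | Plagiarism/Resources/submissions/submissions/2334256.py | return_word
-- ===== SOURCE A (Python) =====
-- def return_word(s):
--     word = ""
--     for ch in s:
--         if "a" <= ch <= "z" or "A" <= ch <= "Z":
--             word += ch
--         else:
--             return word
--     return word
-- ===== SOURCE B (Python) =====
-- import re
--
-- def return_word(s):
--     # leading maximal run of ASCII letters (greedy, always matches, '' if none)
--     return re.match(r'[A-Za-z]*', s).group(0)
-- ===== Notes on version B (the rewrite author's own statement) =====
-- stated objective: idiomatic
-- what changed: Replaced the manual character-by-character accumulation loop with early return by a single regex match of the leading [A-Za-z]* run.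
import Mathlib
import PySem

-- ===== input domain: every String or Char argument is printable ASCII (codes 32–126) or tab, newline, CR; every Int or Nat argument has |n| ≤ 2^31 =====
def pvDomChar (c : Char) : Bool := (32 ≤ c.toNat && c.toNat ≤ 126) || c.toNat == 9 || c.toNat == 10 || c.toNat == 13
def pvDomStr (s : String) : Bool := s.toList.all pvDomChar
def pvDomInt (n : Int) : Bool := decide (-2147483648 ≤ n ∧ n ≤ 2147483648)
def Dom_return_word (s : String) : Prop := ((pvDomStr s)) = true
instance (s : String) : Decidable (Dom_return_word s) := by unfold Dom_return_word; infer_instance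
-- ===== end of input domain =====

-- ===== PORT A =====
-- A: accumulate letters one by one; return early at the first non-letter.
def return_word_go (word : List Char) (cs : List Char) : List Char :=
  match cs with
  | [] => word
  | ch :: rest =>
    if ('a' ≤ ch ∧ ch ≤ 'z') ∨ ('A' ≤ ch ∧ ch ≤ 'Z') then
      return_word_go (word ++ [ch]) rest
    else
      word

def return_word (s : String) : String := String.mk (return_word_go [] s.toList)

-- ===== PORT B =====
-- B: re.match(r'[A-Za-z]*', s).group(0) — the greedy leading run of ASCII
-- letters, i.e. exactly takeWhile of the ASCII-letter predicate (exact).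
def return_word_alt (s : String) : String :=
  String.mk (s.toList.takeWhile (fun ch =>
    decide (('a' ≤ ch ∧ ch ≤ 'z') ∨ ('A' ≤ ch ∧ ch ≤ 'Z'))))

-- ===== PRECONDITION & SPEC =====
def Spec_return_word (s : String) (out : String) : Prop := out = return_word_alt s
instance (s : String) (out : String) : Decidable (Spec_return_word s out) := by unfold Spec_return_word; infer_instance

-- ===== CLAIM (what is proved, stated in full; the proofs are below) =====
def Claim_equal_return_word : Prop := ∀ (s : String), Dom_return_word s → Spec_return_word s (return_word s)

-- ===== LEMMAS AND PROOFS =====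

-- ===== VERDICT (by name: the statement is the Claim_ definition above) =====
lemma return_word_go_eq (cs : List Char) : ∀ (w : List Char),
    return_word_go w cs =
      w ++ cs.takeWhile (fun ch =>
        decide (('a' ≤ ch ∧ ch ≤ 'z') ∨ ('A' ≤ ch ∧ ch ≤ 'Z'))) := by
  induction cs with
  | nil => intro w; simp [return_word_go]
  | cons ch rest ih =>
    intro w
    by_cases h : ('a' ≤ ch ∧ ch ≤ 'z') ∨ ('A' ≤ ch ∧ ch ≤ 'Z')
    · simp [return_word_go, h, ih, List.takeWhile_cons]
    · simp [return_word_go, h, List.takeWhile_cons]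

-- ===== VERDICT (by name: the statement is the Claim_ definition above) =====
theorem return_word_spec : Claim_equal_return_word := by
  intro s _
  unfold Spec_return_word return_word return_word_alt
  rw [return_word_go_eq]
  simp
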